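-- pv_equiv track=rewrite | github.com/YichongLeng/word_frequency | wf.py | calculate_phrase_freq_after_v
-- ===== SOURCE A (Python) =====
-- def is_lower_letter(chatr):
--     return 97 <= ord(chatr) <= 122
--
-- def is_upper_letter(chatr):
--     return 65 <= ord(chatr) <= 90
--
-- def is_digit(chatr):
--     return 48 <= ord(chatr) <= 57
--
-- def is_space(chatr):
--     return ord(chatr) in (9, 10, 13, 32)
--
-- def calculate_phrase_freq_after_v(all_lines, phrase_length):
--     phrase_dict = {}
--     all_contents = ""
--     all_contents = all_contents.join(all_lines)
--     started = False
--     previous_words = []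
--     previous_words_num = 0
--     current_word = ""
--     for chatr in all_contents:
--         if started == False and (is_lower_letter(chatr) or is_upper_letter(chatr)):
--             started = True
--             current_word += chatr.lower()
--         elif started and (is_digit(chatr) or is_lower_letter(chatr) or is_upper_letter(chatr)):
--             current_word += chatr.lower()
--         elif started and is_space(chatr) and current_word:
--             previous_words.append(current_word)
--             previous_words_num += 1
--             current_word = ""
--             if previous_words_num == phrase_length:
--                 phrase = ' '.join(previous_words)
--                 if phrase in phrase_dict.keys():
--                     phrase_dict[phrase] += 1
--                 else:
--                     phrase_dict[phrase] = 1
--                 previous_words.pop(0)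
--                 previous_words_num -= 1
--         elif started and not (is_space(chatr)):
--             if current_word:
--                 previous_words.append(current_word)
--                 previous_words_num += 1
--                 if previous_words_num == phrase_length:
--                     phrase = ' '.join(previous_words)
--                     if phrase in phrase_dict.keys():
--                         phrase_dict[phrase] += 1
--                     else:
--                         phrase_dict[phrase] = 1
--             started = False
--             previous_words = []
--             previous_words_num = 0
--             current_word = ""
--         else:
--             pass
--     return phrase_dict
-- ===== SOURCE B (Python) =====
-- def calculate_phrase_freq_after_v(all_lines, phrase_length):
--     # Phase 1: split the joined text into runs of lowercased tokens.
--     # A token is recorded only when its terminating delimiter is seen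
--     # (so a token pending at end-of-input is dropped); any non-space,
--     # non-alphanumeric character ends the current run.
--     text = "".join(all_lines)
--     runs = []
--     tokens = []
--     word = ""
--     started = False
--     for c in text:
--         o = ord(c)
--         letter = 65 <= o <= 90 or 97 <= o <= 122
--         alnum = letter or 48 <= o <= 57
--         space = o in (9, 10, 13, 32)
--         if not started:
--             if letter:
--                 started = True
--                 word = c.lower()
--         elif alnum:
--             word += c.lower()
--         elif space:
--             if word:
--                 tokens.append(word)
--                 word = ""
--         else:
--             if word:
--                 tokens.append(word)
--             runs.append(tokens)
--             tokens = []
--             word = ""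
--             started = False
--     runs.append(tokens)
--     # Phase 2: count every consecutive phrase_length-gram of each run.
--     freq = {}
--     if phrase_length <= 0:
--         return freq
--     for ts in runs:
--         ts = list(ts)
--         while phrase_length <= len(ts):
--             phrase = " ".join(ts[:phrase_length])
--             freq[phrase] = freq.get(phrase, 0) + 1
--             ts.pop(0)
--     return freq
-- ===== Notes on version B (the rewrite author's own statement) =====
-- stated objective: alternative
-- what changed: B replaces A's single character scan that interleaves sliding-window maintenance and dict updates with a two-phase decomposition: first a tokenizer that produces runs of delimiter-terminated lowercased tokens, then a per-run pass that counts every consecutive phrase_length-gram by joining the window at the head and popping it.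
import Mathlib
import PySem

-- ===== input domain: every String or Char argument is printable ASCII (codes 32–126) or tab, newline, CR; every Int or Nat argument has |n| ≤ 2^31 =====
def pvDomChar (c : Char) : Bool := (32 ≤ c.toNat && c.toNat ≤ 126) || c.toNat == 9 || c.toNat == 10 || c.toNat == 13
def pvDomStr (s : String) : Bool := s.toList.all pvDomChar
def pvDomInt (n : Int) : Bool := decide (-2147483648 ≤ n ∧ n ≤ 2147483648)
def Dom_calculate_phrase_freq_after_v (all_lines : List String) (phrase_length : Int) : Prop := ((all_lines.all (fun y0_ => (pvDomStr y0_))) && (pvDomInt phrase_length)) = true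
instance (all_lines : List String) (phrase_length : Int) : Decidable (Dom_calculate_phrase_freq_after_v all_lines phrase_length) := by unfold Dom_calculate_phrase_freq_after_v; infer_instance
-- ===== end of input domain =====

-- ===== PORT A =====
-- B re-decomposes A's interleaved scan into tokenize-into-runs + per-run n-gram counting (alternative decomposition; same return value).
def pvIsLowerLetter (c : Char) : Bool := 97 ≤ c.toNat && c.toNat ≤ 122
def pvIsUpperLetter (c : Char) : Bool := 65 ≤ c.toNat && c.toNat ≤ 90
def pvIsDigitCh (c : Char) : Bool := 48 ≤ c.toNat && c.toNat ≤ 57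
def pvIsSpaceCh (c : Char) : Bool := c.toNat == 9 || c.toNat == 10 || c.toNat == 13 || c.toNat == 32

-- the dict update 'if phrase in d: d[phrase] += 1 else: d[phrase] = 1'
def pvBumpA (d : PySem.Dict String Int) (k : String) : PySem.Dict String Int :=
  if d.contains k then d.insert k (d.getD k 0 + 1) else d.insert k 1

-- the main for-loop of A, state = (started, previous_words, previous_words_num, current_word, phrase_dict)
def pvAloop (L : Int) (cs : List Char) (started : Bool) (prev : List (List Char))
    (num : Int) (cur : List Char) (d : PySem.Dict String Int) : PySem.Dict String Int :=
  match cs with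
  | [] => d
  | c :: rest =>
    if started == false && (pvIsLowerLetter c || pvIsUpperLetter c) then
      pvAloop L rest true prev num (cur ++ [PySem.Chars.lowerChar c]) d
    else if started && (pvIsDigitCh c || pvIsLowerLetter c || pvIsUpperLetter c) then
      pvAloop L rest started prev num (cur ++ [PySem.Chars.lowerChar c]) d
    else if started && pvIsSpaceCh c && !cur.isEmpty then
      let prev' := prev ++ [cur]
      let num' := num + 1
      if num' == L then
        pvAloop L rest started (prev'.drop 1) (num' - 1) []
          (pvBumpA d (String.ofList (PySem.Chars.join [' '] prev')))
      else
        pvAloop L rest started prev' num' [] d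
    else if started && !pvIsSpaceCh c then
      let d' :=
        if !cur.isEmpty then
          (if num + 1 == L then pvBumpA d (String.ofList (PySem.Chars.join [' '] (prev ++ [cur]))) else d)
        else d
      pvAloop L rest false [] 0 [] d'
    else
      pvAloop L rest started prev num cur d

def calculate_phrase_freq_after_v (all_lines : List String) (phrase_length : Int) : List (String × Int) :=
  (pvAloop phrase_length ((all_lines.map String.toList).flatten) false [] 0 [] PySem.Dict.empty).items

-- ===== PORT B =====
-- phase 1 step: state = (runs, tokens, word, started)
def pvP1Step (st : List (List (List Char)) × List (List Char) × List Char × Bool) (c : Char) :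
    List (List (List Char)) × List (List Char) × List Char × Bool :=
  let (runs, tokens, word, started) := st
  let letter := (65 ≤ c.toNat && c.toNat ≤ 90) || (97 ≤ c.toNat && c.toNat ≤ 122)
  let alnum := letter || (48 ≤ c.toNat && c.toNat ≤ 57)
  let space := c.toNat == 9 || c.toNat == 10 || c.toNat == 13 || c.toNat == 32
  if !started then
    if letter then (runs, tokens, [PySem.Chars.lowerChar c], true) else st
  else if alnum then (runs, tokens, word ++ [PySem.Chars.lowerChar c], started)
  else if space then
    (if !word.isEmpty then (runs, tokens ++ [word], [], started) else st)
  else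
    (runs ++ [if !word.isEmpty then tokens ++ [word] else tokens], [], [], false)

-- phase 2 inner while-loop: count every phrase_length-gram of one run, popping the head
def pvCountRun (L : Nat) (d : PySem.Dict String Int) : List (List Char) → PySem.Dict String Int
  | [] => d
  | t :: rest =>
    if L ≤ rest.length + 1 then
      let phrase := String.ofList (PySem.Chars.join [' '] ((t :: rest).take L))
      pvCountRun L (d.insert phrase (d.getD phrase 0 + 1)) rest
    else d

def calculate_phrase_freq_after_v_alt (all_lines : List String) (phrase_length : Int) : List (String × Int) :=
  let cs := (all_lines.map String.toList).flatten
  let st := cs.foldl pvP1Step ([], [], [], false)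
  let runs := st.1 ++ [st.2.1]
  if phrase_length ≤ 0 then []
  else (runs.foldl (pvCountRun phrase_length.toNat) PySem.Dict.empty).items

-- ===== PRECONDITION & SPEC =====
def Spec_calculate_phrase_freq_after_v (all_lines : List String) (phrase_length : Int) (out : List (String × Int)) : Prop := out = calculate_phrase_freq_after_v_alt all_lines phrase_length
instance (all_lines : List String) (phrase_length : Int) (out : List (String × Int)) : Decidable (Spec_calculate_phrase_freq_after_v all_lines phrase_length out) := by unfold Spec_calculate_phrase_freq_after_v; infer_instance

-- ===== CLAIM (what is proved, stated in full; the proofs are below) =====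
def Claim_equal_calculate_phrase_freq_after_v : Prop := ∀ (all_lines : List String) (phrase_length : Int), Dom_calculate_phrase_freq_after_v all_lines phrase_length → Spec_calculate_phrase_freq_after_v all_lines phrase_length (calculate_phrase_freq_after_v all_lines phrase_length)

-- ===== LEMMAS AND PROOFS =====

lemma pvBumpA_eq (d : PySem.Dict String Int) (k : String) :
    pvBumpA d k = d.insert k (d.getD k 0 + 1) := by
  by_cases h : d.contains k
  · simp [pvBumpA, h]
  · have h0 : d.getD k 0 = 0 := PySem.Dict.getD_of_not_contains d 0 (by simpa using h)
    simp [pvBumpA, h, h0]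

lemma pvCountRun_short (L : Nat) (d : PySem.Dict String Int) (ts : List (List Char))
    (h : ts.length < L) : pvCountRun L d ts = d := by
  cases ts with
  | nil => rfl
  | cons t rest => simp at h; simp [pvCountRun, Nat.not_le.mpr h]

-- the key lemma: appending one token adds exactly the window ending at it (when long enough)
lemma pvCountRun_snoc (L : Nat) (hL : 1 ≤ L) (ts : List (List Char)) (w : List Char) :
    ∀ d, pvCountRun L d (ts ++ [w]) =
      if L ≤ ts.length + 1 then
        (pvCountRun L d ts).insert
          (String.ofList (PySem.Chars.join [' '] (ts.drop (ts.length + 1 - L) ++ [w])))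
          ((pvCountRun L d ts).getD
            (String.ofList (PySem.Chars.join [' '] (ts.drop (ts.length + 1 - L) ++ [w]))) 0 + 1)
      else pvCountRun L d ts := by
  induction ts with
  | nil =>
    intro d
    have hL1 : L = 1 ∨ 1 < L := by omega
    rcases hL1 with h1 | h1
    · subst h1; simp [pvCountRun]
    · simp [pvCountRun, Nat.not_le.mpr h1]
  | cons t rest ih =>
    intro d
    by_cases h1 : L ≤ rest.length + 1
    · -- the window fits inside t :: rest already
      have htake : (t :: (rest ++ [w])).take L = (t :: rest).take L := by
        rw [show t :: (rest ++ [w]) = (t :: rest) ++ [w] from rfl]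
        exact List.take_append_of_le_length (by simpa using h1)
      have hdrop : (t :: rest).drop ((t :: rest).length + 1 - L) = rest.drop (rest.length + 1 - L) := by
        simp only [List.length_cons]
        rw [show rest.length + 1 + 1 - L = (rest.length + 1 - L) + 1 by omega, List.drop_succ_cons]
      have hlhs : pvCountRun L d ((t :: rest) ++ [w]) =
          pvCountRun L
            (d.insert (String.ofList (PySem.Chars.join [' '] ((t :: rest).take L)))
              (d.getD (String.ofList (PySem.Chars.join [' '] ((t :: rest).take L))) 0 + 1))
            (rest ++ [w]) := by
        rw [List.cons_append]
        simp only [pvCountRun]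
        rw [if_pos (by simp; omega), htake]
      have hrhs1 : pvCountRun L d (t :: rest) =
          pvCountRun L
            (d.insert (String.ofList (PySem.Chars.join [' '] ((t :: rest).take L)))
              (d.getD (String.ofList (PySem.Chars.join [' '] ((t :: rest).take L))) 0 + 1))
            rest := by
        simp only [pvCountRun]
        rw [if_pos h1]
      rw [hlhs, ih, hrhs1, if_pos h1,
        if_pos (show L ≤ (t :: rest).length + 1 by simp; omega), hdrop]
    · by_cases h2 : L ≤ rest.length + 2
      · -- L = rest.length + 2 : the appended token completes the very first window
        have htake : (t :: (rest ++ [w])).take L = t :: (rest ++ [w]) := by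
          apply List.take_of_length_le; simp; omega
        have hlhs : pvCountRun L d ((t :: rest) ++ [w]) =
            d.insert (String.ofList (PySem.Chars.join [' '] (t :: (rest ++ [w]))))
              (d.getD (String.ofList (PySem.Chars.join [' '] (t :: (rest ++ [w])))) 0 + 1) := by
          rw [List.cons_append]
          simp only [pvCountRun]
          rw [if_pos (by simp; omega), htake,
            pvCountRun_short L _ (rest ++ [w]) (by simp; omega)]
        rw [hlhs, if_pos (show L ≤ (t :: rest).length + 1 by simp; omega),
          pvCountRun_short L d (t :: rest) (by simp; omega),
          show (t :: rest).length + 1 - L = 0 by simp; omega, List.drop_zero]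
        simp
      · -- even with w the run is too short
        rw [List.cons_append,
          pvCountRun_short L d (t :: (rest ++ [w])) (by simp; omega),
          if_neg (show ¬ L ≤ (t :: rest).length + 1 by simp; omega),
          pvCountRun_short L d (t :: rest) (by simp; omega)]

-- the runs accumulator of phase 1 is only appended to
lemma pvP1_shift (cs : List Char) :
    ∀ (runs : List (List (List Char))) (t : List (List Char)) (w : List Char) (s : Bool),
      cs.foldl pvP1Step (runs, t, w, s) =
        (runs ++ (cs.foldl pvP1Step ([], t, w, s)).1, (cs.foldl pvP1Step ([], t, w, s)).2) := by
  induction cs with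
  | nil => intro runs t w s; simp
  | cons c rest ih =>
    intro runs t w s
    have hstep : pvP1Step (runs, t, w, s) c =
        (runs ++ (pvP1Step ([], t, w, s) c).1, (pvP1Step ([], t, w, s) c).2) := by
      simp only [pvP1Step]
      split_ifs <;> simp
    simp only [List.foldl_cons, hstep]
    obtain ⟨r1, t1, w1, s1⟩ := pvP1Step ([], t, w, s) c
    rw [ih (runs ++ r1) t1 w1 s1, ih r1 t1 w1 s1]
    simp

-- the A-loop with L ≤ 0 never records anything (num = prev.length never reaches L)
lemma pvAloop_nonpos (L : Int) (hL : L ≤ 0) (cs : List Char) :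
    ∀ (started : Bool) (prev : List (List Char)) (cur : List Char) (d : PySem.Dict String Int),
      pvAloop L cs started prev (prev.length : Int) cur d = d := by
  induction cs with
  | nil => intro started prev cur d; rfl
  | cons c rest ih =>
    intro started prev cur d
    have hne : (((prev.length : Int) + 1) == L) = false := by
      simp only [beq_eq_false_iff_ne, ne_eq]; omega
    simp only [pvAloop, hne, Bool.false_eq_true, if_false, ite_self]
    split_ifs
    · exact ih _ _ _ _
    · exact ih _ _ _ _
    · simpa using ih started (prev ++ [cur]) [] d
    · simpa using ih false [] [] d
    · exact ih _ _ _ _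

-- the main bridge: A's interleaved loop equals phase-2 applied to phase-1's output
lemma pvBridge (n : Nat) (hn : 1 ≤ n) (cs : List Char) :
    ∀ (tokens : List (List Char)) (word : List Char) (started : Bool)
      (dBase : PySem.Dict String Int),
      (started = false → word = []) →
      pvAloop (n : Int) cs started (tokens.drop (tokens.length + 1 - n))
          (((tokens.drop (tokens.length + 1 - n)).length : Nat) : Int) word
          (pvCountRun n dBase tokens) =
        pvCountRun n
          ((cs.foldl pvP1Step ([], tokens, word, started)).1.foldl (pvCountRun n) dBase)
          (cs.foldl pvP1Step ([], tokens, word, started)).2.1 := by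
  induction cs with
  | nil =>
    intro tokens word started dBase hw
    simp [pvAloop]
  | cons c rest ih =>
    intro tokens word started dBase hw
    simp only [List.foldl_cons]
    cases started with
    | false =>
      have hw0 : word = [] := hw rfl
      subst hw0
      by_cases hlet : (pvIsLowerLetter c || pvIsUpperLetter c) = true
      · -- a letter starts a token
        have hA : ∀ prv nm d, pvAloop (n : Int) (c :: rest) false prv nm [] d =
            pvAloop (n : Int) rest true prv nm [PySem.Chars.lowerChar c] d := by
          intro prv nm d
          simp [pvAloop, hlet]
        have hB : pvP1Step ([], tokens, [], false) c =
            ([], tokens, [PySem.Chars.lowerChar c], true) := by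
          have hr : ((65 ≤ c.toNat && c.toNat ≤ 90) || (97 ≤ c.toNat && c.toNat ≤ 122)) = true := by
            simp only [pvIsLowerLetter, pvIsUpperLetter] at hlet
            rcases Bool.or_eq_true_iff.mp hlet with h | h <;> simp [h]
          simp [pvP1Step, hr]
        rw [hA, hB]
        exact ih tokens [PySem.Chars.lowerChar c] true dBase (fun h => by simp at h)
      · -- nothing happens
        have hF : (pvIsLowerLetter c || pvIsUpperLetter c) = false := by
          cases h : (pvIsLowerLetter c || pvIsUpperLetter c) with
          | false => rfl
          | true => exact absurd h hlet
        simp only [pvIsLowerLetter, pvIsUpperLetter, Bool.or_eq_false_iff] at hF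
        have hA : ∀ prv nm d, pvAloop (n : Int) (c :: rest) false prv nm [] d =
            pvAloop (n : Int) rest false prv nm [] d := by
          intro prv nm d
          simp [pvAloop, pvIsLowerLetter, pvIsUpperLetter, hF.1, hF.2]
        have hB : pvP1Step ([], tokens, [], false) c = ([], tokens, [], false) := by
          have hr : ((65 ≤ c.toNat && c.toNat ≤ 90) || (97 ≤ c.toNat && c.toNat ≤ 122)) = false := by
            simp only [Bool.or_eq_false_iff]
            exact ⟨hF.2, hF.1⟩
          simp [pvP1Step, hr]
        rw [hA, hB]
        exact ih tokens [] false dBase (fun _ => rfl)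
    | true =>
      by_cases halnum : (pvIsDigitCh c || pvIsLowerLetter c || pvIsUpperLetter c) = true
      · -- alphanumeric extends the current word
        have hA : ∀ prv nm d, pvAloop (n : Int) (c :: rest) true prv nm word d =
            pvAloop (n : Int) rest true prv nm (word ++ [PySem.Chars.lowerChar c]) d := by
          intro prv nm d
          simp [pvAloop, halnum]
        have hB : pvP1Step ([], tokens, word, true) c =
            ([], tokens, word ++ [PySem.Chars.lowerChar c], true) := by
          have hr : (((65 ≤ c.toNat && c.toNat ≤ 90) || (97 ≤ c.toNat && c.toNat ≤ 122))
              || (48 ≤ c.toNat && c.toNat ≤ 57)) = true := by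
            simp only [pvIsDigitCh, pvIsLowerLetter, pvIsUpperLetter, Bool.or_eq_true] at halnum
            simp only [Bool.or_eq_true]
            tauto
          simp [pvP1Step, hr]
        rw [hA, hB]
        exact ih tokens (word ++ [PySem.Chars.lowerChar c]) true dBase (fun h => by simp at h)
      · have hF : (pvIsDigitCh c || pvIsLowerLetter c || pvIsUpperLetter c) = false := by
          cases h : (pvIsDigitCh c || pvIsLowerLetter c || pvIsUpperLetter c) with
          | false => rfl
          | true => exact absurd h halnum
        simp only [pvIsDigitCh, pvIsLowerLetter, pvIsUpperLetter, Bool.or_eq_false_iff] at hF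
        have halnumF : (((65 ≤ c.toNat && c.toNat ≤ 90) || (97 ≤ c.toNat && c.toNat ≤ 122))
            || (48 ≤ c.toNat && c.toNat ≤ 57)) = false := by
          simp only [Bool.or_eq_false_iff]
          exact ⟨⟨hF.2, hF.1.2⟩, hF.1.1⟩
        by_cases hsp : pvIsSpaceCh c = true
        · by_cases hwe : word = []
          · -- space, no pending word: nothing happens on either side
            subst hwe
            have hA : ∀ prv nm d, pvAloop (n : Int) (c :: rest) true prv nm [] d =
                pvAloop (n : Int) rest true prv nm [] d := by
              intro prv nm d
              simp [pvAloop, pvIsDigitCh, pvIsLowerLetter, pvIsUpperLetter,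
                hF.1.1, hF.1.2, hF.2, hsp]
            have hB : pvP1Step ([], tokens, [], true) c = ([], tokens, [], true) := by
              have hspr : (c.toNat == 9 || c.toNat == 10 || c.toNat == 13 || c.toNat == 32) = true := hsp
              simp [pvP1Step, halnumF, hspr]
            rw [hA, hB]
            exact ih tokens [] true dBase (fun h => by simp at h)
          · -- space terminates the pending word: one token is emitted
            have hwne : (!word.isEmpty) = true := by simp [hwe]
            have hB : pvP1Step ([], tokens, word, true) c = ([], tokens ++ [word], [], true) := by
              have hspr : (c.toNat == 9 || c.toNat == 10 || c.toNat == 13 || c.toNat == 32) = true := hsp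
              simp [pvP1Step, halnumF, hspr, hwne]
            rw [hB]
            have hdict := pvCountRun_snoc n hn tokens word dBase
            by_cases hfit : n ≤ tokens.length + 1
            · have hdrop2 : (tokens ++ [word]).drop ((tokens ++ [word]).length + 1 - n) =
                  (tokens.drop (tokens.length + 1 - n) ++ [word]).drop 1 := by
                rw [show tokens.drop (tokens.length + 1 - n) ++ [word]
                      = (tokens ++ [word]).drop (tokens.length + 1 - n) from
                    (List.drop_append_of_le_length (by omega)).symm,
                  List.drop_drop]
                congr 1
                simp
                omega
              have hnum : ((tokens.length - (tokens.length + 1 - n) : Nat) : Int) + 1 = ((n : Nat) : Int) := by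
                omega
              have hA : pvAloop (n : Int) (c :: rest) true (tokens.drop (tokens.length + 1 - n))
                  (((tokens.drop (tokens.length + 1 - n)).length : Nat) : Int) word
                  (pvCountRun n dBase tokens) =
                  pvAloop (n : Int) rest true
                    ((tokens.drop (tokens.length + 1 - n) ++ [word]).drop 1)
                    ((n : Int) - 1)
                    []
                    (pvBumpA (pvCountRun n dBase tokens)
                      (String.ofList (PySem.Chars.join [' ']
                        (tokens.drop (tokens.length + 1 - n) ++ [word])))) := by
                simp [pvAloop, pvIsDigitCh, pvIsLowerLetter, pvIsUpperLetter,
                  hF.1.1, hF.1.2, hF.2, hsp, hwne, hnum]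
              have hdict' : pvCountRun n dBase (tokens ++ [word]) =
                  pvBumpA (pvCountRun n dBase tokens)
                    (String.ofList (PySem.Chars.join [' ']
                      (tokens.drop (tokens.length + 1 - n) ++ [word]))) := by
                rw [hdict, if_pos hfit, ← pvBumpA_eq]
              have hlen2 : ((n : Int) - 1)
                  = ((((tokens ++ [word]).drop ((tokens ++ [word]).length + 1 - n)).length : Nat) : Int) := by
                simp only [List.length_drop, List.length_append, List.length_cons, List.length_nil]
                omega
              rw [hA, ← hdict', ← hdrop2, hlen2]
              exact ih (tokens ++ [word]) [] true dBase (fun h => by simp at h)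
            · have hnum : ¬ (((tokens.length - (tokens.length + 1 - n) : Nat) : Int) + 1 = ((n : Nat) : Int)) := by
                omega
              have hA : pvAloop (n : Int) (c :: rest) true (tokens.drop (tokens.length + 1 - n))
                  (((tokens.drop (tokens.length + 1 - n)).length : Nat) : Int) word
                  (pvCountRun n dBase tokens) =
                  pvAloop (n : Int) rest true
                    (tokens.drop (tokens.length + 1 - n) ++ [word])
                    ((((tokens.drop (tokens.length + 1 - n)).length : Nat) : Int) + 1) []
                    (pvCountRun n dBase tokens) := by
                simp [pvAloop, pvIsDigitCh, pvIsLowerLetter, pvIsUpperLetter,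
                  hF.1.1, hF.1.2, hF.2, hsp, hwne, hnum]
              have hpre : tokens.drop (tokens.length + 1 - n) ++ [word]
                  = (tokens ++ [word]).drop ((tokens ++ [word]).length + 1 - n) := by
                rw [show (tokens ++ [word]).length + 1 - n = 0 by simp; omega, List.drop_zero]
                rw [show tokens.length + 1 - n = 0 by omega, List.drop_zero]
              have hdictE : pvCountRun n dBase tokens = pvCountRun n dBase (tokens ++ [word]) := by
                rw [hdict, if_neg hfit]
              have hlen2 : ((((tokens.drop (tokens.length + 1 - n)).length : Nat) : Int) + 1)
                  = ((((tokens ++ [word]).drop ((tokens ++ [word]).length + 1 - n)).length : Nat) : Int) := by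
                rw [← hpre]
                simp only [List.length_append, List.length_drop, List.length_cons, List.length_nil]
                push_cast
                omega
              rw [hA, hdictE, hlen2, hpre]
              exact ih (tokens ++ [word]) [] true dBase (fun h => by simp at h)
        · -- punctuation: the run ends
          have hspF : pvIsSpaceCh c = false := by
            cases h : pvIsSpaceCh c with
            | false => rfl
            | true => exact absurd h hsp
          have hB : pvP1Step ([], tokens, word, true) c =
              ([(if !word.isEmpty then tokens ++ [word] else tokens)], [], [], false) := by
            have hspr : (c.toNat == 9 || c.toNat == 10 || c.toNat == 13 || c.toNat == 32) = false := hspF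
            simp [pvP1Step, halnumF, hspr]
          rw [hB, pvP1_shift rest [(if !word.isEmpty then tokens ++ [word] else tokens)] [] [] false]
          have hdict := pvCountRun_snoc n hn tokens word dBase
          have hA : pvAloop (n : Int) (c :: rest) true (tokens.drop (tokens.length + 1 - n))
              (((tokens.drop (tokens.length + 1 - n)).length : Nat) : Int) word
              (pvCountRun n dBase tokens) =
              pvAloop (n : Int) rest false [] 0 []
                (pvCountRun n dBase (if !word.isEmpty then tokens ++ [word] else tokens)) := by
            by_cases hwe : word = []
            · subst hwe
              simp [pvAloop, pvIsDigitCh, pvIsLowerLetter, pvIsUpperLetter,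
                hF.1.1, hF.1.2, hF.2, hspF]
            · have hwne : (!word.isEmpty) = true := by simp [hwe]
              rw [show (if !word.isEmpty then tokens ++ [word] else tokens) = tokens ++ [word] by
                rw [if_pos hwne], hdict]
              by_cases hfit : n ≤ tokens.length + 1
              · have hnum : ((tokens.length - (tokens.length + 1 - n) : Nat) : Int) + 1 = ((n : Nat) : Int) := by
                  omega
                rw [if_pos hfit]
                simp [pvAloop, pvIsDigitCh, pvIsLowerLetter, pvIsUpperLetter,
                  hF.1.1, hF.1.2, hF.2, hspF, hwne, hnum, pvBumpA_eq]
              · have hnum : ¬ (((tokens.length - (tokens.length + 1 - n) : Nat) : Int) + 1 = ((n : Nat) : Int)) := by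
                  omega
                rw [if_neg hfit]
                simp [pvAloop, pvIsDigitCh, pvIsLowerLetter, pvIsUpperLetter,
                  hF.1.1, hF.1.2, hF.2, hspF, hwne, hnum]
          rw [hA]
          have hrec := ih [] [] false
            (pvCountRun n dBase (if !word.isEmpty then tokens ++ [word] else tokens)) (fun _ => rfl)
          simp only [List.drop_nil, List.length_nil, Nat.cast_zero] at hrec
          rw [show pvCountRun n (pvCountRun n dBase (if !word.isEmpty then tokens ++ [word] else tokens)) []
                = pvCountRun n dBase (if !word.isEmpty then tokens ++ [word] else tokens) from rfl] at hrec
          rw [hrec]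
          simp

-- ===== VERDICT (by name: the statement is the Claim_ definition above) =====
theorem calculate_phrase_freq_after_v_spec : Claim_equal_calculate_phrase_freq_after_v := by
  intro all_lines phrase_length _
  unfold Spec_calculate_phrase_freq_after_v
  unfold calculate_phrase_freq_after_v calculate_phrase_freq_after_v_alt
  by_cases hL : phrase_length ≤ 0
  · simp only [if_pos hL]
    have h0 := pvAloop_nonpos phrase_length hL ((all_lines.map String.toList).flatten)
      false [] [] PySem.Dict.empty
    simp only [List.length_nil, Nat.cast_zero] at h0
    rw [h0]
    rfl
  · have hn : 1 ≤ phrase_length.toNat := by omega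
    have hcast : ((phrase_length.toNat : Nat) : Int) = phrase_length := Int.toNat_of_nonneg (by omega)
    simp only [if_neg hL]
    have hb := pvBridge phrase_length.toNat hn ((all_lines.map String.toList).flatten)
      [] [] false PySem.Dict.empty (fun _ => rfl)
    simp only [List.drop_nil, List.length_nil, Nat.cast_zero, hcast] at hb
    rw [show pvCountRun phrase_length.toNat PySem.Dict.empty [] = PySem.Dict.empty from rfl] at hb
    rw [hb, List.foldl_append]
    rfl
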